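-- pv_equiv track=rewrite | github.com/KIYI671/AhabAssistantLimbusCompany | utils/utils.py | check_teams_order
-- ===== SOURCE A (Python) =====
-- def check_teams_order(lst):
--     # 收集所有非零元素的（值，原始索引）对
--     non_zero = [(val, idx) for idx, val in enumerate(lst) if val > 0]
--     # 按值降序排序，值相同时按原始索引升序排序
--     sorted_non_zero = sorted(non_zero, key=lambda x: (-x[0], x[1]))
--     # 初始化结果列表为全0
--     result = [0] * len(lst)
--     # 非零元素的数量
--     n = len(sorted_non_zero)
--     # 为每个非零元素分配对应的递增值
--     for i in range(n):
--         val, original_idx = sorted_non_zero[i]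
--         # 最大的元素对应n，次大的对应n-1，依此类推
--         result[original_idx] = n - i
--     return result
-- ===== SOURCE B (Python) =====
-- def check_teams_order(lst):
--     n = sum(1 for v in lst if v > 0)
--
--     def above(idx, val):
--         # non-zero elements ranking strictly higher: greater value, or equal value at a smaller index
--         return sum(1 for j, w in enumerate(lst)
--                    if w > 0 and (w > val or (w == val and j < idx)))
--
--     return [n - above(idx, val) if val > 0 else 0 for idx, val in enumerate(lst)]
-- ===== Notes on version B (the rewrite author's own statement) =====
-- stated objective: alternative
-- what changed: Replaces the sort-then-assign pass (collect positive (val,idx) pairs, sort by (-val,idx), write n-i back through the sorted order) by a direct rank computation: each positive element's rank is n minus the number of positive elements that outrank it (greater value, or equal value at smaller index), computed by a counting scan per element with no sort and no in-place writes.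
import Mathlib
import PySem

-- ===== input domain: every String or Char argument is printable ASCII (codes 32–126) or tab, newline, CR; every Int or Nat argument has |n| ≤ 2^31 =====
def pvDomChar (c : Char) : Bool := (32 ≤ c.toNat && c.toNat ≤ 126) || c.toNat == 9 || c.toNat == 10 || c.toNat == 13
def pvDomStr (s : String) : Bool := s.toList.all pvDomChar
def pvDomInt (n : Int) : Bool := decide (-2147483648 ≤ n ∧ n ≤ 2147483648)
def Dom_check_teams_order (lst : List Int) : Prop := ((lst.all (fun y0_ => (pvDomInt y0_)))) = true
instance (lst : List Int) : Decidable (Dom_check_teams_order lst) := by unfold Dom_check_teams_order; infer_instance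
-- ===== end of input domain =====

-- B replaces A's sort-then-assign pass by a direct rank computation (count of outranking
-- positive elements per position); an alternative decomposition, not claimed faster.

-- ===== PORT A =====
def check_teams_order (lst : List Int) : List Int :=
  let non_zero := ((PySem.List.enumerate lst).filter (fun p => decide (0 < p.2))).map
    (fun p => (p.2, p.1))
  -- Python's tuple key (-val, idx) compares lexicographically: ported with the Lex product order
  let sorted_non_zero := PySem.List.sorted non_zero
    (fun x => (toLex (-x.1, x.2) : Int ×ₗ Int))
  let result := List.replicate lst.length (0 : Int)
  let n := PySem.List.len sorted_non_zero
  (PySem.List.pyRange 0 n).foldl (fun res i =>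
    let v := PySem.List.pyGetD sorted_non_zero i (0, 0)
    PySem.List.pySetD res v.2 (n - i)) result

-- ===== PORT B =====
def cto_above (lst : List Int) (idx val : Int) : Int :=
  ((PySem.List.enumerate lst).countP (fun q =>
    decide (0 < q.2 ∧ (val < q.2 ∨ (q.2 = val ∧ q.1 < idx)))) : Int)

def check_teams_order_alt (lst : List Int) : List Int :=
  let n : Int := (lst.countP (fun v => decide (0 < v)) : Int)
  (PySem.List.enumerate lst).map (fun p =>
    if 0 < p.2 then n - cto_above lst p.1 p.2 else 0)

-- ===== PRECONDITION & SPEC =====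
def Spec_check_teams_order (lst : List Int) (out : List Int) : Prop := out = check_teams_order_alt lst
instance (lst : List Int) (out : List Int) : Decidable (Spec_check_teams_order lst out) := by unfold Spec_check_teams_order; infer_instance

-- ===== CLAIM (what is proved, stated in full; the proofs are below) =====
def Claim_equal_check_teams_order : Prop := ∀ (lst : List Int), Dom_check_teams_order lst → Spec_check_teams_order lst (check_teams_order lst)

-- ===== LEMMAS AND PROOFS =====

theorem cto_rank_eq {α κ : Type} [LinearOrder κ] (s : List α) (K : α → κ)
    (h : s.Pairwise (fun a b => K a < K b)) (i : Nat) (hi : i < s.length) :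
    s.countP (fun y => decide (K y < K s[i])) = i := by
  have hpg := List.pairwise_iff_getElem.1 h
  obtain ⟨x, hxe⟩ : ∃ x, s[i] = x := ⟨_, rfl⟩
  rw [hxe]
  have h1 : ∀ p (hp : p < s.length), p < i → K s[p] < K x := by
    intro p hp hpi; rw [← hxe]; exact hpg p i hp hi hpi
  have h2 : ∀ p (hp : p < s.length), i ≤ p → ¬ (K s[p] < K x) := by
    intro p hp hip
    rcases eq_or_lt_of_le hip with rfl | hlt
    · rw [← hxe]; exact lt_irrefl _
    · rw [← hxe]; exact lt_asymm (hpg i p hi hp hlt)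
  have hsplit : s.countP (fun y => decide (K y < K x)) =
      (s.take i).countP (fun y => decide (K y < K x)) +
      (s.drop i).countP (fun y => decide (K y < K x)) := by
    rw [← List.countP_append, List.take_append_drop]
  rw [hsplit]
  have ht : (s.take i).countP (fun y => decide (K y < K x)) = i := by
    rw [List.countP_eq_length.2, List.length_take, Nat.min_eq_left (Nat.le_of_lt hi)]
    intro a ha
    obtain ⟨p, hp, rfl⟩ := List.mem_iff_getElem.1 ha
    rw [List.getElem_take]
    have hpi : p < i := by have := hp; rw [List.length_take] at this; omega
    have hpl : p < s.length := by omega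
    simpa using h1 p hpl hpi
  have hd : (s.drop i).countP (fun y => decide (K y < K x)) = 0 := by
    rw [List.countP_eq_zero]
    intro a ha
    obtain ⟨p, hp, rfl⟩ := List.mem_iff_getElem.1 ha
    rw [List.getElem_drop]
    have hpl : i + p < s.length := by have := hp; rw [List.length_drop] at this; omega
    simpa using h2 (i + p) hpl (Nat.le_add_right i p)
  omega

theorem cto_fold_set (ps : List (Int × (Int × Int))) (res : List Int) (N : Int) (j : Nat)
    (hj : j < res.length)
    (hnn : ∀ q ∈ ps, 0 ≤ q.2.2)
    (hdist : ps.Pairwise (fun a b => a.2.2 ≠ b.2.2)) :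
    PySem.List.pyGetD (ps.foldl (fun r q => PySem.List.pySetD r q.2.2 (N - q.1)) res) (j : Int) 0 =
      match ps.find? (fun q => q.2.2 == (j : Int)) with
      | some q => N - q.1
      | none => PySem.List.pyGetD res (j : Int) 0 := by
  induction ps generalizing res with
  | nil => simp
  | cons q ps ih =>
    simp only [List.foldl_cons, List.find?_cons]
    have hq0 : 0 ≤ q.2.2 := hnn q (List.mem_cons_self)
    have hrest : ∀ b ∈ ps, 0 ≤ b.2.2 := fun b hb => hnn b (List.mem_cons_of_mem _ hb)
    have hpc := List.pairwise_cons.1 hdist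
    have hlen : j < (PySem.List.pySetD res q.2.2 (N - q.1)).length := by
      rw [PySem.List.length_pySetD]; exact hj
    by_cases hqj : q.2.2 = (j : Int)
    · have hnone : ps.find? (fun b => b.2.2 == (j : Int)) = none := by
        apply List.find?_eq_none.2
        intro b hb
        simp only [beq_iff_eq]
        intro hbj
        exact hpc.1 b hb (by rw [hqj, hbj])
      rw [ih _ hlen hrest hpc.2, hnone]
      have : (q.2.2 == (j : Int)) = true := by simp [hqj]
      rw [this]
      simp only [hqj]
      rw [PySem.List.pyGetD_pySetD_natCast res j j _ _ hj]
      simp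
    · have : (q.2.2 == (j : Int)) = false := by simp [hqj]
      rw [ih _ hlen hrest hpc.2, this]
      obtain ⟨m, hm⟩ : ∃ m : Nat, q.2.2 = (m : Int) :=
        ⟨q.2.2.toNat, (Int.toNat_of_nonneg hq0).symm⟩
      have hmj : m ≠ j := by intro h; exact hqj (by rw [hm, h])
      cases hfind : ps.find? (fun b => b.2.2 == (j : Int)) <;> simp only []
      · -- none case: pyGetD (pySetD res q.2.2 v) j 0 = pyGetD res j 0
        rw [hm, PySem.List.pySetD_natCast]
        by_cases hml : m < res.length
        · have := PySem.List.pyGetD_pySetD_natCast res m j (N - q.1) 0 hml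
          rw [PySem.List.pySetD_natCast] at this
          rw [this]
          simp [hmj.symm]
        · rw [List.set_eq_of_length_le (by omega)]

theorem cto_fold_length (ps : List (Int × (Int × Int))) (res : List Int) (N : Int) :
    (ps.foldl (fun r q => PySem.List.pySetD r q.2.2 (N - q.1)) res).length = res.length := by
  induction ps generalizing res with
  | nil => rfl
  | cons q ps ih => simp [List.foldl_cons, ih, PySem.List.length_pySetD]

def ctoK (x : Int × Int) : Int ×ₗ Int := toLex (-x.1, x.2)

-- the list of (value, original index) pairs A builds
def ctoNZ (lst : List Int) : List (Int × Int) :=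
  ((PySem.List.enumerate lst).filter (fun p => decide (0 < p.2))).map (fun p => (p.2, p.1))

theorem ctoNZ_mem (lst : List Int) (a : Int × Int) :
    a ∈ ctoNZ lst ↔ ∃ k : Nat, ∃ _ : k < lst.length, a = (lst[k], (k : Int)) ∧ 0 < lst[k] := by
  simp only [ctoNZ, List.mem_map, List.mem_filter, PySem.List.mem_enumerate_iff]
  constructor
  · rintro ⟨p, ⟨⟨k, hk, rfl⟩, hpos⟩, rfl⟩
    simp only [decide_eq_true_eq] at hpos
    exact ⟨k, hk, by simp, hpos⟩
  · rintro ⟨k, hk, rfl, hpos⟩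
    exact ⟨((k : Int), lst[k]), ⟨⟨k, hk, by simp⟩, by simpa using hpos⟩, rfl⟩

theorem ctoNZ_pairwise_snd (lst : List Int) :
    (ctoNZ lst).Pairwise (fun a b => a.2 < b.2) := by
  have h1 : ((PySem.List.enumerate lst).filter (fun p => decide (0 < p.2))).Pairwise
      (fun p q => p.1 < q.1) :=
    (PySem.List.pairwise_lt_enumerate lst 0).sublist List.filter_sublist
  exact List.pairwise_map.2 (h1.imp (fun h => h))

theorem check_teams_order_eq (lst : List Int) :
    check_teams_order lst = check_teams_order_alt lst := by
  have hnz := ctoNZ_mem lst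
  have hpsnd := ctoNZ_pairwise_snd lst
  set nz := ctoNZ lst with hnzdef
  set s := PySem.List.sorted nz ctoK with hsdef
  have hperm : s.Perm nz := PySem.List.sorted_perm nz ctoK false
  -- distinct keys
  have hKne : nz.Pairwise (fun a b => ctoK a ≠ ctoK b) := by
    refine hpsnd.imp ?_
    intro a b hab hKeq
    have : a.2 = b.2 := congrArg (fun z => (ofLex z).2) hKeq
    omega
  have hKnodup : (s.map ctoK).Nodup := by
    have : (nz.map ctoK).Nodup := List.pairwise_map.2 hKne
    exact (hperm.map ctoK).nodup_iff.2 this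
  have hslt : s.Pairwise (fun a b => ctoK a < ctoK b) := by
    have hle : s.Pairwise (fun a b => ctoK a ≤ ctoK b) := PySem.List.sorted_pairwise nz ctoK
    have hne : s.Pairwise (fun a b => ctoK a ≠ ctoK b) := List.pairwise_map.1 hKnodup
    exact (hle.and hne).imp (fun ⟨h1, h2⟩ => lt_of_le_of_ne h1 h2)
  have hsnodup : (s.map (fun x => x.2)).Nodup := by
    have : (nz.map (fun x => x.2)).Nodup :=
      List.pairwise_map.2 (hpsnd.imp (fun h => ne_of_lt h))
    exact (hperm.map _).nodup_iff.2 this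
  have hN : s.length = lst.countP (fun v => decide (0 < v)) := by
    rw [hperm.length_eq, hnzdef, ctoNZ, List.length_map, ← List.countP_eq_length_filter]
    conv_rhs => rw [← PySem.List.map_snd_enumerate lst 0, List.countP_map]
    rfl
  -- rewrite A's loop over indices as a loop over enumerate s
  have hA : check_teams_order lst =
      (PySem.List.enumerate s).foldl
        (fun r q => PySem.List.pySetD r q.2.2 (PySem.List.len s - q.1))
        (List.replicate lst.length 0) := by
    simp only [check_teams_order]
    rw [PySem.List.enumerate_eq_map_pyRange s ((0 : Int), (0 : Int)), List.foldl_map]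
    rfl
  -- hypotheses for the fold lemma
  have hnn : ∀ q ∈ PySem.List.enumerate s, 0 ≤ q.2.2 := by
    intro q hq
    obtain ⟨k, hk, rfl⟩ := (PySem.List.mem_enumerate_iff s 0 q).1 hq
    have hmem : s[k] ∈ nz := hperm.mem_iff.1 (s.getElem_mem hk)
    obtain ⟨k', hk', heq, _⟩ := (hnz _).1 hmem
    simp [heq]
  have hdist : (PySem.List.enumerate s).Pairwise (fun a b => a.2.2 ≠ b.2.2) := by
    have h2 : s.Pairwise (fun a b => a.2 ≠ b.2) := List.pairwise_map.1 hsnodup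
    rw [← PySem.List.map_snd_enumerate s 0] at h2
    exact ((List.pairwise_map (f := fun q : Int × Int × Int => q.2)).1 h2).imp (fun h => h)
  have hlenA : (check_teams_order lst).length = lst.length := by
    rw [hA, cto_fold_length, List.length_replicate]
  have hlenB : (check_teams_order_alt lst).length = lst.length := by
    simp [check_teams_order_alt, PySem.List.length_enumerate]
  apply List.ext_getElem (by rw [hlenA, hlenB])
  intro j hjA hjB
  have hj : j < lst.length := by rwa [hlenA] at hjA
  have hB : (check_teams_order_alt lst)[j]'hjB =
      (if 0 < lst[j] then (lst.countP (fun v => decide (0 < v)) : Int) - cto_above lst (j : Int) lst[j] else 0) := by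
    simp [check_teams_order_alt, PySem.List.getElem_enumerate]
  have hrep : j < (List.replicate lst.length (0 : Int)).length := by simpa using hj
  have hAj : (check_teams_order lst)[j]'hjA =
      match (PySem.List.enumerate s).find? (fun q => q.2.2 == (j : Int)) with
      | some q => PySem.List.len s - q.1
      | none => PySem.List.pyGetD (List.replicate lst.length 0) (j : Int) 0 := by
    rw [← cto_fold_set (PySem.List.enumerate s) _ _ j hrep hnn hdist]
    rw [PySem.List.pyGetD_natCast,
        List.getD_eq_getElem _ _ (by rw [cto_fold_length, List.length_replicate]; exact hj)]
    exact List.getElem_of_eq hA hjA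
  rw [hAj, hB]
  by_cases hpos : 0 < lst[j]
  · have hxmem : ((lst[j], (j : Int)) : Int × Int) ∈ nz := (hnz _).2 ⟨j, hj, rfl, hpos⟩
    have hxs : ((lst[j], (j : Int)) : Int × Int) ∈ s := hperm.mem_iff.2 hxmem
    obtain ⟨k, hk, hks⟩ := List.mem_iff_getElem.1 hxs
    have hmem_es : ((0 + (k : Int), s[k]) : Int × Int × Int) ∈ PySem.List.enumerate s :=
      (PySem.List.mem_enumerate_iff s 0 _).2 ⟨k, hk, rfl⟩
    have hpred : ((0 + (k : Int), s[k]) : Int × Int × Int).2.2 == (j : Int) := by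
      simp [hks]
    have hsome : ((PySem.List.enumerate s).find? (fun q => q.2.2 == (j : Int))).isSome :=
      List.find?_isSome.2 ⟨_, hmem_es, hpred⟩
    obtain ⟨q, hq⟩ := Option.isSome_iff_exists.1 hsome
    have hqmem := List.mem_of_find?_eq_some hq
    have hqpred := List.find?_some hq
    obtain ⟨k', hk', hq'⟩ := (PySem.List.mem_enumerate_iff s 0 q).1 hqmem
    have hsk' : s[k'].2 = (j : Int) := by
      rw [hq'] at hqpred; simpa using hqpred
    have hkk : k' = k := by
      have h1 : (s.map (fun x => x.2))[k']'(by simpa using hk') =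
          (s.map (fun x => x.2))[k]'(by simpa using hk) := by
        simp [hsk', hks]
      exact (hsnodup.getElem_inj_iff).1 h1
    subst hkk
    rw [hq, hq']
    rw [if_pos hpos]
    have hcount : cto_above lst (j : Int) lst[j] = (k' : Int) := by
      unfold cto_above
      have e1 : (PySem.List.enumerate lst).countP (fun q =>
            decide (0 < q.2 ∧ (lst[j] < q.2 ∨ (q.2 = lst[j] ∧ q.1 < (j : Int))))) =
          nz.countP (fun y => decide (ctoK y < ctoK (lst[j], (j : Int)))) := by
        rw [hnzdef, ctoNZ, List.countP_map, List.countP_filter]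
        apply List.countP_congr
        intro x hx
        simp only [Function.comp, ctoK, Prod.Lex.toLex_lt_toLex, Bool.and_eq_true,
          decide_eq_true_eq]
        omega
      have e2 : nz.countP (fun y => decide (ctoK y < ctoK (lst[j], (j : Int)))) =
          s.countP (fun y => decide (ctoK y < ctoK (lst[j], (j : Int)))) :=
        (hperm.countP_eq _).symm
      have e3 : s.countP (fun y => decide (ctoK y < ctoK (lst[j], (j : Int)))) = k' := by
        have := cto_rank_eq s ctoK hslt k' hk'
        rwa [hks] at this
      rw [e1, e2, e3]
    rw [hcount]
    simp only [PySem.List.len]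
    rw [hN]
    ring
  · have hfn : (PySem.List.enumerate s).find? (fun q => q.2.2 == (j : Int)) = none := by
      apply List.find?_eq_none.2
      intro q hq
      obtain ⟨k, hk, rfl⟩ := (PySem.List.mem_enumerate_iff s 0 q).1 hq
      have hmem : s[k] ∈ nz := hperm.mem_iff.1 (s.getElem_mem hk)
      obtain ⟨k', hk', heq, hposk⟩ := (hnz _).1 hmem
      simp only [heq, beq_iff_eq]
      intro hcontra
      have : k' = j := by exact_mod_cast hcontra
      subst this
      exact hpos hposk
    rw [hfn, if_neg hpos]
    rw [PySem.List.pyGetD_natCast, List.getD_eq_getElem _ _ (by simpa using hj)]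
    simp

-- ===== VERDICT (by name: the statement is the Claim_ definition above) =====
theorem check_teams_order_spec : Claim_equal_check_teams_order := by
  intro lst _
  unfold Spec_check_teams_order
  exact check_teams_order_eq lst
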